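-- pv_equiv track=rewrite | github.com/mickgian/PratikoAi-BE | app/core/streaming_processor.py | _strip_overlap
-- ===== SOURCE A (Python) =====
-- def _strip_overlap(accumulated: str, incoming: str) -> str:
--     """Remove overlap when incoming snapshot's head overlaps our tail."""
--     window = 200
--     a_tail = accumulated[-window:]
--     i_head = incoming[:window]
--     best = 0
--     m = min(len(a_tail), len(i_head))
--     for k in range(1, m + 1):
--         if a_tail[-k:] == i_head[:k]:
--             best = k
--     return incoming[best:]
-- ===== SOURCE B (Python) =====
-- def _strip_overlap(accumulated: str, incoming: str) -> str:
--     window = 200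
--     a_tail = accumulated[-window:]
--     i_head = incoming[:window]
--     if not i_head:
--         return incoming
--     n = len(a_tail)
--     first = i_head[0]
--     pos = a_tail.find(first)
--     while pos != -1:
--         if i_head.startswith(a_tail[pos:]):
--             return incoming[n - pos:]
--         pos = a_tail.find(first, pos + 1)
--     return incoming
-- ===== Notes on version B (the rewrite author's own statement) =====
-- stated objective: alternative
-- what changed: Instead of testing every overlap length k = 1..m ascending and remembering the last match, B uses str.find on the first character of the head to jump between candidate start positions in the tail and returns at the first (= longest) candidate verified by startswith.
import Mathlib
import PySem

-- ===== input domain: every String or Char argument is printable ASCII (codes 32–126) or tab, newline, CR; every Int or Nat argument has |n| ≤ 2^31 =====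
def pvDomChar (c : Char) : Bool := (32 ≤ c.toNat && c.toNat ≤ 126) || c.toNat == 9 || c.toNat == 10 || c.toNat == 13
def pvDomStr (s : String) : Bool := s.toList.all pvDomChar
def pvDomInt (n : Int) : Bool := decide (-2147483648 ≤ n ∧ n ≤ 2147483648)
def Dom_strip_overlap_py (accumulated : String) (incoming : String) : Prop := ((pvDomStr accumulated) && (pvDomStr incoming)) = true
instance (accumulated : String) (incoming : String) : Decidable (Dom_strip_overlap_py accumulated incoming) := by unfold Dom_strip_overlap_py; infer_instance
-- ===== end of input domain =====

-- B replaces A's try-every-overlap-length scan by a first-character occurrence search (str.find)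
-- that jumps between candidate alignments and returns at the first (= longest) verified overlap;
-- objective: alternative (candidate generation by find instead of exhaustive length enumeration).

-- ===== PORT A =====
def strip_overlap_py (accumulated : String) (incoming : String) : String :=
  let window : Int := 200
  let a_tail := PySem.List.slice accumulated.toList (some (-window)) none
  let i_head := PySem.List.slice incoming.toList none (some window)
  let m : Nat := min a_tail.length i_head.length
  let best : Int :=
    (PySem.List.pyRange 1 ((m : Int) + 1) 1).foldl
      (fun best k =>
        if PySem.List.slice a_tail (some (-k)) none = PySem.List.slice i_head none (some k) then k
        else best) 0
  String.ofList (PySem.List.slice incoming.toList (some best) none)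

-- ===== PORT B =====
-- the while loop of Source B: pos is the current result of a_tail.find(first, …); fuel only
-- bounds the recursion (the find result strictly increases, so fuel = len(a_tail)+1 never runs out)
def stripAltLoop (a_tail i_head inc : List Char) (first : Char) : Nat → Int → List Char
  | 0, _ => inc
  | fuel + 1, pos =>
    if pos = -1 then inc
    else if PySem.Chars.startswith i_head (a_tail.drop pos.toNat) then
      inc.drop (a_tail.length - pos.toNat)
    else stripAltLoop a_tail i_head inc first fuel
      (PySem.Chars.findFrom a_tail [first] (pos + 1) none)

def strip_overlap_py_alt (accumulated : String) (incoming : String) : String :=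
  let window : Int := 200
  let a_tail := PySem.List.slice accumulated.toList (some (-window)) none
  let i_head := PySem.List.slice incoming.toList none (some window)
  match i_head with
  | [] => String.ofList incoming.toList
  | first :: rest =>
    String.ofList (stripAltLoop a_tail (first :: rest) incoming.toList first
      (a_tail.length + 1) (PySem.Chars.findFrom a_tail [first] 0 none))

-- ===== PRECONDITION & SPEC =====
def Spec_strip_overlap_py (accumulated : String) (incoming : String) (out : String) : Prop := out = strip_overlap_py_alt accumulated incoming
instance (accumulated : String) (incoming : String) (out : String) : Decidable (Spec_strip_overlap_py accumulated incoming out) := by unfold Spec_strip_overlap_py; infer_instance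

-- ===== CLAIM (what is proved, stated in full; the proofs are below) =====
def Claim_equal_strip_overlap_py : Prop := ∀ (accumulated : String) (incoming : String), Dom_strip_overlap_py accumulated incoming → Spec_strip_overlap_py accumulated incoming (strip_overlap_py accumulated incoming)

-- ===== LEMMAS AND PROOFS =====

-- A's loop, read back-to-front: best over k ∈ [1..j] = first matching k counted downward.
def maxRec (t h : List Char) : Nat → Int
  | 0 => 0
  | j + 1 =>
    if t.drop (t.length - (j + 1)) = h.take (j + 1) then ((j + 1 : Nat) : Int)
    else maxRec t h j

-- the position (start index in t) of the longest suffix of t that is a prefix of h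
def bestPos (t h : List Char) : Option Nat :=
  (List.range t.length).find? (fun q => PySem.Chars.startswith h (t.drop q))

-- A's foldl over range(1, m+1) equals maxRec
lemma foldl_strip (t h : List Char) (m : Nat) (hm : m ≤ t.length) :
    (PySem.List.pyRange 1 ((m : Int) + 1) 1).foldl
      (fun best k =>
        if PySem.List.slice t (some (-k)) none = PySem.List.slice h none (some k) then k
        else best) 0 = maxRec t h m := by
  induction m with
  | zero => simp [maxRec]
  | succ j ih =>
    have h1 : ((j + 1 : Nat) : Int) + 1 = ((j : Nat) : Int) + 1 + 1 := by push_cast; ring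
    rw [h1, PySem.List.pyRange_one_succ_right (by omega), List.foldl_append]
    rw [ih (by omega)]
    simp only [List.foldl_cons, List.foldl_nil]
    have h2 : (((j : Nat) : Int) + 1) = ((j + 1 : Nat) : Int) := by push_cast; ring
    rw [h2, PySem.List.slice_from_neg_natCast t (j + 1) (Nat.succ_pos j),
      PySem.List.slice_to_natCast h (j + 1)]
    rfl

-- downward maxRec is determined by the max matching k
lemma maxRec_of_forall_not (t h : List Char) (j : Nat)
    (hn : ∀ k, 1 ≤ k → k ≤ j → t.drop (t.length - k) ≠ h.take k) :
    maxRec t h j = 0 := by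
  induction j with
  | zero => rfl
  | succ i ih =>
    rw [maxRec, if_neg (hn (i + 1) (by omega) (by omega))]
    exact ih fun k h1 h2 => hn k h1 (by omega)

lemma maxRec_of_max (t h : List Char) (j k : Nat) (h1 : 1 ≤ k) (h2 : k ≤ j)
    (hk : t.drop (t.length - k) = h.take k)
    (hmax : ∀ k', k < k' → k' ≤ j → t.drop (t.length - k') ≠ h.take k') :
    maxRec t h j = (k : Int) := by
  induction j with
  | zero => omega
  | succ i ih =>
    by_cases hji : k = i + 1
    · subst hji; rw [maxRec, if_pos hk]
    · rw [maxRec, if_neg (hmax (i + 1) (by omega) (by omega))]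
      exact ih (by omega) fun k' ha hb => hmax k' ha (by omega)

-- a position q < t.length with no occurrence of h's first char cannot start an overlap
lemma no_match_of_no_char (t : List Char) (c : Char) (h' : List Char) (q : Nat)
    (hq : q < t.length) (hc : ¬ [c] <+: t.drop q) : ¬ t.drop q <+: (c :: h') := by
  intro hpre
  rw [List.drop_eq_getElem_cons hq] at hpre hc
  obtain ⟨he, -⟩ := List.cons_prefix_cons.mp hpre
  exact hc (by simp [he])

-- the while loop of B returns the overlap at bestPos
lemma stripAltLoop_spec (t h' inc : List Char) (c : Char) :
    ∀ (fuel p : Nat), p ≤ t.length → t.length + 1 ≤ fuel + p →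
    (∀ q, q < p → ¬ t.drop q <+: (c :: h')) →
    stripAltLoop t (c :: h') inc c fuel (PySem.Chars.findFrom t [c] (p : Int) none) =
      (match bestPos t (c :: h') with
       | some q => inc.drop (t.length - q)
       | none => inc) := by
  intro fuel
  induction fuel with
  | zero => intro p hp hf _; omega
  | succ fuel ih =>
    intro p hp hf hbefore
    by_cases hneg : PySem.Chars.findFrom t [c] (p : Int) none = -1
    · -- no further occurrence of c: no overlap exists at any position ≥ p either
      have hnochar : ¬ ([c] <:+: t.drop p) :=
        (PySem.Chars.findFrom_natCast_eq_neg_one_iff t [c] p hp).mp hneg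
      have hnone : bestPos t (c :: h') = none := by
        rw [bestPos, List.find?_eq_none]
        intro q hq
        simp only [List.mem_range] at hq
        simp only [PySem.Chars.startswith_iff]
        rcases Nat.lt_or_ge q p with hlt | hge
        · exact hbefore q hlt
        · refine no_match_of_no_char t c h' q hq fun hpre => hnochar ?_
          refine (PySem.Chars.exists_prefix_drop_iff_isIn [c] (t.drop p)).mp
            ⟨q - p, ?_⟩ |> (PySem.Chars.isIn_iff_infix [c] (t.drop p)).mp
          have hq' : p + (q - p) = q := by omega
          rw [List.drop_drop, hq']
          exact hpre
      rw [hnone, stripAltLoop, if_pos hneg]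
    · -- an occurrence at r = findFrom …; test it, else continue after it
      obtain ⟨hle, hocc, hmin⟩ := PySem.Chars.findFrom_natCast_spec t [c] p hp hneg
      set r : Int := PySem.Chars.findFrom t [c] (p : Int) none with hr
      have hr0 : 0 ≤ r := le_trans (Int.natCast_nonneg p) hle
      have hrn : r.toNat < t.length := by
        have := hocc.length_le
        simp only [List.length_cons, List.length_nil, List.length_drop] at this
        omega
      -- no overlap starts strictly before r.toNat
      have hbefore' : ∀ q, q < r.toNat → ¬ t.drop q <+: (c :: h') := by
        intro q hq
        rcases Nat.lt_or_ge q p with hlt | hge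
        · exact hbefore q hlt
        · exact no_match_of_no_char t c h' q (by omega) (hmin q hge hq)
      rw [stripAltLoop, if_neg hneg]
      by_cases hhit : PySem.Chars.startswith (c :: h') (t.drop r.toNat) = true
      · -- overlap verified: this is bestPos
        have : bestPos t (c :: h') = some r.toNat := by
          rw [bestPos, List.find?_range_eq_some]
          refine ⟨hhit, List.mem_range.mpr hrn, fun j hj => ?_⟩
          simp only [Bool.not_eq_eq_eq_not, Bool.not_true, ← Bool.not_eq_true,
            PySem.Chars.startswith_iff]
          exact hbefore' j hj
        rw [if_pos hhit, this]
      · rw [if_neg hhit]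
        have hcast : r + 1 = ((r.toNat + 1 : Nat) : Int) := by omega
        have hpr : p ≤ r.toNat := by omega
        rw [hcast]
        refine ih (r.toNat + 1) (by omega) (by omega) ?_
        intro q hq
        rcases Nat.lt_or_ge q r.toNat with hlt | hge
        · exact hbefore' q hlt
        · have hqe : q = r.toNat := by omega
          subst hqe
          exact fun hpre => hhit ((PySem.Chars.startswith_iff _ _).mpr hpre)

-- the two characterisations coincide: A's max matching length = t.length - bestPos
lemma maxRec_eq_bestPos (t h : List Char) :
    maxRec t h (min t.length h.length) =
      (match bestPos t h with
       | some q => ((t.length - q : Nat) : Int)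
       | none => 0) := by
  rcases hb : bestPos t h with _ | q
  · -- no overlap at all
    rw [bestPos, List.find?_eq_none] at hb
    refine maxRec_of_forall_not t h _ fun k h1 h2 heq => ?_
    have hkn : k ≤ t.length := le_trans h2 (Nat.min_le_left _ _)
    have hkh : k ≤ h.length := le_trans h2 (Nat.min_le_right _ _)
    have hq : t.length - k < t.length := by omega
    have := hb (t.length - k) (List.mem_range.mpr hq)
    rw [Bool.not_eq_true, ← Bool.not_eq_true, PySem.Chars.startswith_iff] at this
    exact this (heq ▸ List.take_prefix k h)
  · rw [bestPos, List.find?_range_eq_some] at hb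
    obtain ⟨hhit, hqmem, hqmin⟩ := hb
    have hqn : q < t.length := List.mem_range.mp hqmem
    have hpre : t.drop q <+: h := (PySem.Chars.startswith_iff _ _).mp hhit
    have hlen : (t.drop q).length = t.length - q := List.length_drop ..
    have hkh : t.length - q ≤ h.length := by
      have := hpre.length_le; omega
    refine maxRec_of_max t h _ (t.length - q) (by omega) (by omega) ?_ ?_
    · have := List.prefix_iff_eq_take.mp hpre
      rw [hlen] at this
      rw [Nat.sub_sub_self (by omega)]
      exact this
    · intro k' hk1 hk2 heq
      have hk'n : k' ≤ t.length := le_trans hk2 (Nat.min_le_left _ _)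
      have hq' : t.length - k' < q := by omega
      have := hqmin (t.length - k') hq'
      rw [Bool.not_eq_eq_eq_not, Bool.not_true, ← Bool.not_eq_true,
        PySem.Chars.startswith_iff] at this
      exact this (heq ▸ List.take_prefix k' h)

-- ===== VERDICT (by name: the statement is the Claim_ definition above) =====
theorem strip_overlap_py_spec : Claim_equal_strip_overlap_py := by
  intro accumulated incoming _
  unfold Spec_strip_overlap_py strip_overlap_py strip_overlap_py_alt
  dsimp only
  set inc := incoming.toList with hinc
  set t := PySem.List.slice accumulated.toList (some (-(200 : Int))) none with ht
  set h := PySem.List.slice inc none (some (200 : Int)) with hh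
  rw [foldl_strip t h _ (Nat.min_le_left _ _), maxRec_eq_bestPos t h]
  clear_value t h
  cases h with
  | nil =>
    have hbn : bestPos t ([] : List Char) = none := by
      rw [bestPos, List.find?_eq_none]
      intro q hq
      simp only [List.mem_range] at hq
      rw [Bool.not_eq_true, ← Bool.not_eq_true, PySem.Chars.startswith_iff]
      intro hpre
      have := hpre.length_le
      simp only [List.length_nil, List.length_drop] at this
      omega
    rw [hbn]
    rw [PySem.List.slice_from inc (by omega : (0:Int) ≤ 0)]
    simp
  | cons c h' =>
    have hloop := stripAltLoop_spec t h' inc c (t.length + 1) 0 (by omega) (by omega)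
      (fun q hq => absurd hq (by omega))
    simp only [Nat.cast_zero] at hloop
    dsimp only
    rw [hloop]
    rcases hb : bestPos t (c :: h') with _ | q
    · rw [PySem.List.slice_from inc (by omega : (0:Int) ≤ 0)]
      simp
    · rw [PySem.List.slice_from inc (Int.natCast_nonneg (t.length - q))]
      simp
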